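-- pv_equiv track=rewrite | github.com/sud665/python-learning-tracker | tracker/validator.py | _get_challenge_list
-- ===== SOURCE A (Python) =====
-- from typing import Dict, List, Tuple, Any
--
-- def _get_challenge_list(week: int = None) -> List[str]:
--     """챌린지 목록을 반환합니다."""
--     challenges = []
--
--     if week is None or week == 1:
--         for i in range(1, 11):
--             challenge_names = [
--                 "variables", "functions", "conditions", "loops", "lists",
--                 "dicts", "classes", "modules", "files", "exceptions"
--             ]
--             challenges.append(f"challenge_{i:02d}_{challenge_names[i-1]}")
--
--     if week is None or week == 2:
--         challenge_names = ["comprehension", "lambda", "decorators", "context_manager", "type_hints"]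
--         for i, name in enumerate(challenge_names, 11):
--             challenges.append(f"challenge_{i:02d}_{name}")
--
--     if week is None or week == 3:
--         challenge_names = ["fastapi_basics", "request_response", "path_query_params", "request_body", "authentication", "final_project"]
--         for i, name in enumerate(challenge_names, 16):
--             challenges.append(f"challenge_{i:02d}_{name}")
--
--     return challenges
-- ===== SOURCE B (Python) =====
-- from typing import List
--
-- _ALL_NAMES = [
--     "variables", "functions", "conditions", "loops", "lists",
--     "dicts", "classes", "modules", "files", "exceptions",
--     "comprehension", "lambda", "decorators", "context_manager", "type_hints",
--     "fastapi_basics", "request_response", "path_query_params", "request_body",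
--     "authentication", "final_project",
-- ]
--
-- _WEEK_RANGES = {1: (1, 11), 2: (11, 16), 3: (16, 22)}
--
--
-- def _get_challenge_list(week: int = None) -> List[str]:
--     """챌린지 목록을 반환합니다."""
--     if week is None:
--         weeks = [1, 2, 3]
--     elif week in _WEEK_RANGES:
--         weeks = [week]
--     else:
--         weeks = []
--     return [
--         f"challenge_{i:02d}_{_ALL_NAMES[i - 1]}"
--         for w in weeks
--         for i in range(*_WEEK_RANGES[w])
--     ]
-- ===== Notes on version B (the rewrite author's own statement) =====
-- stated objective: simpler
-- what changed: Replaces the three separately guarded loops (each with its own inline name list and numbering scheme) by one master name table plus a week->index-range map, driven by a single comprehension over the selected weeks.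
import Mathlib
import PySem

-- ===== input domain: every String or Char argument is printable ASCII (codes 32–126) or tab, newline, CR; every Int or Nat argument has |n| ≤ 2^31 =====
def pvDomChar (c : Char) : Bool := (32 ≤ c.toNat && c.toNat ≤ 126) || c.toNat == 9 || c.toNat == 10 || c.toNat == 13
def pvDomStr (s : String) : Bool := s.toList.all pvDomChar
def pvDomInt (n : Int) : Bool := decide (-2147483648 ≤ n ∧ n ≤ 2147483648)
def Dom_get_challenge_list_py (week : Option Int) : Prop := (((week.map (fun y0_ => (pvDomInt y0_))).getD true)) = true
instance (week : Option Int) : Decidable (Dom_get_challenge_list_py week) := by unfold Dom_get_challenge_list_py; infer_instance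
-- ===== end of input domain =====

-- B replaces A's three separately guarded loops by one master name table and a
-- week -> index-range map driven by a single filtered pass (objective: simpler).


-- ===== PORT A =====
-- f"challenge_{i:02d}_{name}"; the :02d zero-pad is exact for the width-2 field
-- (a single extra '0' exactly when 0 ≤ i < 10)
def pvFmtA (i : Int) (name : String) : String :=
  String.ofList ("challenge_".toList ++
    (if 0 ≤ i ∧ i < 10 then '0' :: PySem.Int.toChars i else PySem.Int.toChars i) ++
    '_' :: name.toList)

def get_challenge_list_py (week : Option Int) : List String :=
  let challenges : List String := []
  let challenges :=
    if week = none ∨ week = some 1 then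
      (PySem.List.pyRange 1 11 1).foldl (fun acc i =>
        let challenge_names : List String :=
          ["variables", "functions", "conditions", "loops", "lists",
           "dicts", "classes", "modules", "files", "exceptions"]
        acc ++ [pvFmtA i (PySem.List.pyGetD challenge_names (i - 1) "")]) challenges
    else challenges
  let challenges :=
    if week = none ∨ week = some 2 then
      let challenge_names : List String :=
        ["comprehension", "lambda", "decorators", "context_manager", "type_hints"]
      ((PySem.List.pyRange 11 16 1).zip challenge_names).foldl (fun acc p =>
        acc ++ [pvFmtA p.1 p.2]) challenges
    else challenges
  let challenges :=
    if week = none ∨ week = some 3 then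
      let challenge_names : List String :=
        ["fastapi_basics", "request_response", "path_query_params", "request_body",
         "authentication", "final_project"]
      ((PySem.List.pyRange 16 22 1).zip challenge_names).foldl (fun acc p =>
        acc ++ [pvFmtA p.1 p.2]) challenges
    else challenges
  challenges

-- ===== PORT B =====
def pvAllNames : List String :=
  ["variables", "functions", "conditions", "loops", "lists",
   "dicts", "classes", "modules", "files", "exceptions",
   "comprehension", "lambda", "decorators", "context_manager", "type_hints",
   "fastapi_basics", "request_response", "path_query_params", "request_body",
   "authentication", "final_project"]

def pvWeekRanges : PySem.Dict Int (Int × Int) := PySem.Dict.ofList [(1, (1, 11)), (2, (11, 16)), (3, (16, 22))]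

def pvFmtB (i : Int) (name : String) : String :=
  String.ofList ("challenge_".toList ++
    (if 0 ≤ i ∧ i < 10 then '0' :: PySem.Int.toChars i else PySem.Int.toChars i) ++
    '_' :: name.toList)

def get_challenge_list_py_alt (week : Option Int) : List String :=
  let weeks : List Int :=
    match week with
    | none => [1, 2, 3]
    | some w => if (PySem.Dict.get? pvWeekRanges w).isSome then [w] else []
  weeks.flatMap (fun w =>
    let r := PySem.Dict.getD pvWeekRanges w (0, 0)
    (PySem.List.pyRange r.1 r.2 1).map (fun i =>
      pvFmtB i (PySem.List.pyGetD pvAllNames (i - 1) "")))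

-- ===== PRECONDITION & SPEC =====
def Spec_get_challenge_list_py (week : Option Int) (out : List String) : Prop := out = get_challenge_list_py_alt week
instance (week : Option Int) (out : List String) : Decidable (Spec_get_challenge_list_py week out) := by unfold Spec_get_challenge_list_py; infer_instance

-- ===== CLAIM (what is proved, stated in full; the proofs are below) =====
def Claim_equal_get_challenge_list_py : Prop := ∀ (week : Option Int), Dom_get_challenge_list_py week → Spec_get_challenge_list_py week (get_challenge_list_py week)

-- ===== LEMMAS AND PROOFS =====
-- On any week other than none/1/2/3, both functions return [].
theorem pv_other (w : Int) (h1 : w ≠ 1) (h2 : w ≠ 2) (h3 : w ≠ 3) :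
    get_challenge_list_py (some w) = get_challenge_list_py_alt (some w) := by
  unfold get_challenge_list_py get_challenge_list_py_alt
  simp only [pvWeekRanges]
  have hg : (PySem.Dict.ofList [((1:Int), ((1:Int), (11:Int))), (2, (11, 16)), (3, (16, 22))]).get? w = none := by
    simp [PySem.Dict.ofList, PySem.Dict.update, PySem.Dict.get?_insert, PySem.Dict.get?_empty, h1, h2, h3]
  simp [hg, h1, h2, h3]

-- ===== VERDICT (by name: the statement is the Claim_ definition above) =====
theorem get_challenge_list_py_spec : Claim_equal_get_challenge_list_py := by
  intro week _
  show get_challenge_list_py week = get_challenge_list_py_alt week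
  match week with
  | none => decide
  | some w =>
    by_cases h1 : w = 1
    · subst h1; decide
    · by_cases h2 : w = 2
      · subst h2; decide
      · by_cases h3 : w = 3
        · subst h3; decide
        · exact pv_other w h1 h2 h3
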